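-- pv_equiv track=rewrite | github.com/dangductri9242/Light-Out-Multiplayer- | game.py | finalMatrix
-- ===== SOURCE A (Python) =====
-- def swap(value):
--     if value == 0:
--         return 1
--     if value == 1:
--         return 0
--     return value
--
-- def finalMatrix(setting):
--     row=len(setting)
--     col=len(setting[0])
--     border = [0 for i in range(col)]
--     a = []
--     for i in range(row):
--         tmp = []
--         for j in range(col):
--             tmp.append(0)
--         a.append(tmp)
--
--     for i in range(0,len(setting)):
--         for j in range(0,len(setting[i])):
--             if setting[i][j]==1:
--                 a[i][j] = swap(a[i][j])
--                 if i-1>=0: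
--                     a[i-1][j] = swap(a[i-1][j])
--                 if i+1<len(setting):
--                     a[i+1][j] = swap(a[i+1][j])
--                 if j-1>=0:
--                     a[i][j-1] = swap(a[i][j-1])
--                 if j+1<len(setting[i]):
--                     a[i][j+1] = swap(a[i][j+1])
--     return a
-- ===== SOURCE B (Python) =====
-- def finalMatrix(setting):
--     # Gather instead of scatter: each output cell is the parity of the number of
--     # "pressed" (value 1) positions among itself and its in-range neighbours,
--     # using the same per-row length bounds as the original.
--     row = len(setting)
--     col = len(setting[0])
--     result = []
--     for i in range(row):
--         out_row = []
--         ri = setting[i]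
--         for j in range(col):
--             cnt = 0
--             if j < len(ri) and ri[j] == 1:
--                 cnt += 1
--             if i > 0 and j < len(setting[i - 1]) and setting[i - 1][j] == 1:
--                 cnt += 1
--             if i + 1 < row and j < len(setting[i + 1]) and setting[i + 1][j] == 1:
--                 cnt += 1
--             if j > 0 and j < len(ri) and ri[j - 1] == 1:
--                 cnt += 1
--             if j + 1 < len(ri) and ri[j + 1] == 1:
--                 cnt += 1
--             out_row.append(cnt % 2)
--         result.append(out_row)
--     return result
-- ===== Notes on version B (the rewrite author's own statement) =====
-- stated objective: alternative
-- what changed: Replaces A's scatter (each pressed cell toggles itself and in-range neighbours in a mutable grid) with a direct gather: each output cell is computed once as the parity of the count of value-1 cells among itself and its in-range neighbours, using A's exact per-row length bounds.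
import Mathlib
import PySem

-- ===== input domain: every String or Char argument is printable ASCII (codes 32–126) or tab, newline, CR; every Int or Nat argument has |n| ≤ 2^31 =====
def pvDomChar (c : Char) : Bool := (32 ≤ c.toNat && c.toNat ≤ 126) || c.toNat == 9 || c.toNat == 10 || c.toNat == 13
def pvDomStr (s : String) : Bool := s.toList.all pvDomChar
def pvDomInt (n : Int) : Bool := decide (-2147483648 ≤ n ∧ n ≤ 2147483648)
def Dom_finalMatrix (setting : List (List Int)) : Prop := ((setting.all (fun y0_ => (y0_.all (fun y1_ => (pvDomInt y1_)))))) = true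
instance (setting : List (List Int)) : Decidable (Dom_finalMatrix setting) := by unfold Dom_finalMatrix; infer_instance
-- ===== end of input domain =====

-- B replaces A's press-and-toggle scatter over a mutable grid with a direct gather:
-- each output cell is the parity of the count of value-1 cells among itself and its
-- in-range neighbours (same per-row bounds as A); objective: alternative decomposition.

-- ===== PORT A =====
def pySwap (value : Int) : Int :=
  if value = 0 then 1 else if value = 1 then 0 else value

-- a[i][j] = swap(a[i][j]) as a pure update (indices are in range on Pre_)
def setAt (a : List (List Int)) (i j : Nat) : List (List Int) :=
  a.set i ((a.getD i []).set j (pySwap ((a.getD i []).getD j 0)))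

def finalMatrix (setting : List (List Int)) : List (List Int) :=
  let row := setting.length
  let col := (setting.getD 0 []).length
  let a0 := (List.range row).map (fun _ => (List.range col).map (fun _ => (0 : Int)))
  (List.range row).foldl (fun a i =>
    (List.range (setting.getD i []).length).foldl (fun a j =>
      if (setting.getD i []).getD j 0 = 1 then
        let a1 := setAt a i j
        let a2 := if 1 ≤ i then setAt a1 (i-1) j else a1
        let a3 := if i+1 < setting.length then setAt a2 (i+1) j else a2
        let a4 := if 1 ≤ j then setAt a3 i (j-1) else a3
        if j+1 < (setting.getD i []).length then setAt a4 i (j+1) else a4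
      else a) a) a0

-- ===== PORT B =====
def finalMatrix_alt (setting : List (List Int)) : List (List Int) :=
  let row := setting.length
  let col := (setting.getD 0 []).length
  (List.range row).map (fun i =>
    let ri := setting.getD i []
    (List.range col).map (fun j =>
      let cnt : Int :=
        (if j < ri.length ∧ ri.getD j 0 = 1 then 1 else 0)
        + (if 0 < i ∧ j < (setting.getD (i-1) []).length ∧ (setting.getD (i-1) []).getD j 0 = 1 then 1 else 0)
        + (if i+1 < row ∧ j < (setting.getD (i+1) []).length ∧ (setting.getD (i+1) []).getD j 0 = 1 then 1 else 0)
        + (if 0 < j ∧ j < ri.length ∧ ri.getD (j-1) 0 = 1 then 1 else 0)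
        + (if j+1 < ri.length ∧ ri.getD (j+1) 0 = 1 then 1 else 0)
      cnt % 2))

-- ===== PRECONDITION & SPEC =====
-- Pre_ excludes exactly the inputs on which A raises IndexError: the empty list
-- (setting[0]), and inputs where some pressed cell (value 1) makes A write at a column
-- index ≥ len(setting[0]) (directly, or via its right neighbour inside a longer row).
def Pre_finalMatrix (setting : List (List Int)) : Prop :=
  setting ≠ [] ∧ ∀ r ∈ setting, ∀ j, j < r.length → r.getD j 0 = 1 →
    j < (setting.getD 0 []).length ∧ (j + 1 < r.length → j + 1 < (setting.getD 0 []).length)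
instance (setting : List (List Int)) : Decidable (Pre_finalMatrix setting) := by
  unfold Pre_finalMatrix; infer_instance

def pvWitness_finalMatrix : List (List Int) := [[1, 0], [0, 1]]

def Spec_finalMatrix (setting : List (List Int)) (out : List (List Int)) : Prop := out = finalMatrix_alt setting
instance (setting : List (List Int)) (out : List (List Int)) : Decidable (Spec_finalMatrix setting out) := by unfold Spec_finalMatrix; infer_instance

-- ===== CLAIM (what is proved, stated in full; the proofs are below) =====
def Claim_equal_finalMatrix : Prop := ∀ (setting : List (List Int)), Dom_finalMatrix setting → Pre_finalMatrix setting → Spec_finalMatrix setting (finalMatrix setting)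

-- ===== LEMMAS AND PROOFS =====

-- the list of cells toggled by a press at (i, j)
def affected (s : List (List Int)) (i j : Nat) : List (Nat × Nat) :=
  [(i, j)] ++ (if 1 ≤ i then [(i - 1, j)] else []) ++ (if i + 1 < s.length then [(i + 1, j)] else [])
    ++ (if 1 ≤ j then [(i, j - 1)] else []) ++ (if j + 1 < (s.getD i []).length then [(i, j + 1)] else [])

-- all toggles performed by A, in order
def toggles (s : List (List Int)) : List (Nat × Nat) :=
  (List.range s.length).flatMap (fun i =>
    (List.range (s.getD i []).length).flatMap (fun j =>
      if (s.getD i []).getD j 0 = 1 then affected s i j else []))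

lemma foldl_flatMap' {α β γ : Type} (l : List α) (f : α → List β) (g : γ → β → γ) (init : γ) :
    (l.flatMap f).foldl g init = l.foldl (fun acc x => (f x).foldl g acc) init := by
  induction l generalizing init with
  | nil => rfl
  | cons h t ih => simp [List.foldl_append, ih]

lemma press_fold (s : List (List Int)) (i j : Nat) (a : List (List Int)) :
    (let a1 := setAt a i j
     let a2 := if 1 ≤ i then setAt a1 (i-1) j else a1
     let a3 := if i+1 < s.length then setAt a2 (i+1) j else a2
     let a4 := if 1 ≤ j then setAt a3 i (j-1) else a3
     if j+1 < (s.getD i []).length then setAt a4 i (j+1) else a4)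
    = (affected s i j).foldl (fun a p => setAt a p.1 p.2) a := by
  simp only [affected]
  split_ifs <;> simp [List.foldl_append]

lemma finalMatrix_eq_fold (s : List (List Int)) :
    finalMatrix s = (toggles s).foldl (fun a p => setAt a p.1 p.2)
      ((List.range s.length).map (fun _ => (List.range ((s.getD 0 []).length)).map (fun _ => (0 : Int)))) := by
  simp only [finalMatrix, toggles]
  rw [foldl_flatMap']
  congr 1
  funext a r
  rw [foldl_flatMap']
  congr 1
  funext acc j
  by_cases h : (s.getD r []).getD j 0 = 1
  · simp only [if_pos h]
    exact press_fold s r j acc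
  · simp only [if_neg h]
    rfl

lemma setAt_length (a : List (List Int)) (i j : Nat) : (setAt a i j).length = a.length := by
  simp [setAt]

lemma setAt_row_length (a : List (List Int)) (i j k : Nat) :
    ((setAt a i j).getD k []).length = ((a.getD k []).length) := by
  simp only [setAt, List.getD_eq_getElem?_getD, List.getElem?_set]
  by_cases h : i = k
  · subst h
    by_cases hl : i < a.length
    · simp [hl]
    · simp [hl, List.getElem?_eq_none (by omega : a.length ≤ i)]
  · simp [h]

lemma setAt_get (a : List (List Int)) (r c i j : Nat) (hr : r < a.length)
    (hc : c < (a.getD r []).length) :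
    ((setAt a r c).getD i []).getD j 0 =
      if r = i ∧ c = j then pySwap ((a.getD i []).getD j 0) else (a.getD i []).getD j 0 := by
  simp only [setAt, List.getD_eq_getElem?_getD, List.getElem?_set]
  rw [List.getD_eq_getElem?_getD, List.getElem?_eq_getElem hr] at hc
  by_cases h : r = i
  · subst h
    simp only [hr, if_true, if_pos rfl, Option.getD_some]
    by_cases hcj : c = j
    · subst hcj
      simp only [Option.getD_some] at hc
      simp [List.getElem?_set_self', List.getElem?_eq_getElem hr, List.getElem?_eq_getElem hc]
    · simp [List.getElem?_set_ne (by omega : c ≠ j), hcj]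
  · simp [h]

lemma fold_length (T : List (Nat × Nat)) (g : List (List Int)) :
    (T.foldl (fun a p => setAt a p.1 p.2) g).length = g.length := by
  induction T generalizing g with
  | nil => rfl
  | cons p T ih => simp [List.foldl, ih, setAt_length]

lemma fold_row_length (T : List (Nat × Nat)) (g : List (List Int)) (k : Nat) :
    ((T.foldl (fun a p => setAt a p.1 p.2) g).getD k []).length = (g.getD k []).length := by
  induction T generalizing g with
  | nil => rfl
  | cons p T ih => rw [List.foldl_cons, ih, setAt_row_length]

lemma fold_entry (T : List (Nat × Nat)) (g : List (List Int))
    (hT : ∀ p ∈ T, p.1 < g.length ∧ p.2 < (g.getD p.1 []).length)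
    (h01 : ∀ i j, (g.getD i []).getD j 0 = 0 ∨ (g.getD i []).getD j 0 = 1) (i j : Nat) :
    ((T.foldl (fun a p => setAt a p.1 p.2) g).getD i []).getD j 0 =
      if (T.count (i, j) + (if (g.getD i []).getD j 0 = 1 then 1 else 0)) % 2 = 1 then 1 else 0 := by
  induction T generalizing g with
  | nil =>
    simp only [List.foldl_nil, List.count_nil, Nat.zero_add]
    rcases h01 i j with h | h <;> rw [h] <;> norm_num
  | cons p T ih =>
    obtain ⟨pi, pj⟩ := p
    obtain ⟨hp1, hp2⟩ := hT (pi, pj) List.mem_cons_self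
    have hT' : ∀ q ∈ T, q.1 < (setAt g pi pj).length ∧ q.2 < ((setAt g pi pj).getD q.1 []).length := by
      intro q hq
      obtain ⟨h1, h2⟩ := hT q (List.mem_cons_of_mem _ hq)
      rw [setAt_length, setAt_row_length]
      exact ⟨h1, h2⟩
    have h01' : ∀ i j, ((setAt g pi pj).getD i []).getD j 0 = 0 ∨ ((setAt g pi pj).getD i []).getD j 0 = 1 := by
      intro i j
      rw [setAt_get g pi pj i j hp1 hp2]
      split
      · rcases h01 i j with h | h <;> rw [h] <;> simp [pySwap]
      · exact h01 i j
    rw [List.foldl_cons, ih _ hT' h01', setAt_get g pi pj i j hp1 hp2]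
    by_cases hpi : pi = i ∧ pj = j
    · rw [if_pos hpi]
      obtain ⟨rfl, rfl⟩ := hpi
      rw [List.count_cons_self]
      rcases h01 pi pj with h | h <;> rw [h] <;> simp only [pySwap] <;> norm_num <;> split_ifs <;> omega
    · have hne : ¬ ((pi, pj) = (i, j)) := by rw [Prod.mk.injEq]; tauto
      rw [if_neg hpi, List.count_cons]
      simp [hne]

lemma count_flatMap' {α β : Type} [BEq β] (l : List α) (f : α → List β) (b : β) :
    ((l.flatMap f).count b) = (l.map (fun x => (f x).count b)).sum := by
  induction l with
  | nil => rfl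
  | cons h t ih => simp [List.count_append, ih]

lemma sum_range_delta (n k : Nat) (f : Nat → Nat) :
    ((List.range n).map (fun x => if x = k then f x else 0)).sum = if k < n then f k else 0 := by
  induction n with
  | zero => simp
  | succ m ih =>
    rw [List.range_succ]
    simp only [List.map_append, List.sum_append, ih]
    by_cases h : k < m
    · simp [h, Nat.lt_succ_of_lt h, Nat.ne_of_gt h]
    · by_cases h2 : m = k
      · subst h2; simp [h, Nat.lt_irrefl]
      · have : ¬ k < m + 1 := by omega
        simp [h, h2, this]

lemma dsum_delta (row : Nat) (len : Nat → Nat) (r0 c0 : Nat) (q : Nat) :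
    ((List.range row).map (fun r => ((List.range (len r)).map
      (fun c => if r = r0 ∧ c = c0 then q else 0)).sum)).sum
      = if r0 < row ∧ c0 < len r0 then q else 0 := by
  have h : ∀ r ∈ List.range row,
      ((List.range (len r)).map (fun c => if r = r0 ∧ c = c0 then q else 0)).sum
        = if r = r0 then (if c0 < len r then q else 0) else 0 := by
    intro r _
    by_cases hr : r = r0
    · subst hr
      rw [if_pos rfl, ← sum_range_delta (len r) c0 (fun _ => q)]
      congr 1
      apply List.map_congr_left
      intro c _
      simp
    · simp [hr]
  rw [List.map_congr_left h, sum_range_delta row r0 (fun r => if c0 < len r then q else 0)]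
  split_ifs <;> tauto

lemma count_pair_singleton (x y i j : Nat) :
    ([(x, y)] : List (Nat × Nat)).count (i, j) = if x = i ∧ y = j then 1 else 0 := by
  by_cases hx : x = i <;> by_cases hy : y = j <;>
    simp [hx, hy, List.count_cons, Prod.mk.injEq]

lemma count_if_singleton (P : Prop) [Decidable P] (x y i j : Nat) :
    ((if P then [(x, y)] else []) : List (Nat × Nat)).count (i, j)
      = if P ∧ x = i ∧ y = j then 1 else 0 := by
  by_cases hP : P
  · rw [if_pos hP, count_pair_singleton]
    by_cases hx : x = i <;> by_cases hy : y = j <;> simp [hx, hy, hP]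
  · simp [hP]

lemma point1 (s : List (List Int)) (i j r c : Nat) :
    (if (s.getD r []).getD c 0 = 1 then ([(r, c)] : List (Nat × Nat)).count (i, j) else 0)
      = if r = i ∧ c = j then (if j < (s.getD i []).length ∧ (s.getD i []).getD j 0 = 1 then 1 else 0) else 0 := by
  rw [count_pair_singleton]
  by_cases hr : r = i
  · subst hr
    by_cases hc : c = j
    · subst hc
      by_cases hR : r < s.length
      · by_cases hJ : c < (s.getD r []).length
        · split_ifs <;> omega
        · have hv : (s.getD r []).getD c 0 = 0 := List.getD_eq_default _ 0 (by omega)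
          rw [hv]
          split_ifs <;> omega
      · have hrow : s.getD r [] = ([] : List Int) := List.getD_eq_default _ _ (by omega)
        rw [hrow]
        simp only [List.getD_nil, List.length_nil]
        split_ifs <;> omega
    · split_ifs <;> omega
  · split_ifs <;> omega

lemma point2 (s : List (List Int)) (i j r c : Nat) :
    (if (s.getD r []).getD c 0 = 1 then ((if 1 ≤ r then [(r-1, c)] else []) : List (Nat × Nat)).count (i, j) else 0)
      = if r = i + 1 ∧ c = j then (if i + 1 < s.length ∧ j < (s.getD (i+1) []).length ∧ (s.getD (i+1) []).getD j 0 = 1 then 1 else 0) else 0 := by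
  rw [count_if_singleton]
  by_cases hr : r = i + 1
  · subst hr
    by_cases hc : c = j
    · subst hc
      by_cases hR : (i+1) < s.length
      · by_cases hJ : c < (s.getD (i+1) []).length
        · split_ifs <;> omega
        · have hv : (s.getD (i+1) []).getD c 0 = 0 := List.getD_eq_default _ 0 (by omega)
          rw [hv]
          split_ifs <;> omega
      · have hrow : s.getD (i+1) [] = ([] : List Int) := List.getD_eq_default _ _ (by omega)
        rw [hrow]
        simp only [List.getD_nil, List.length_nil]
        split_ifs <;> omega
    · split_ifs <;> omega
  · split_ifs <;> omega

lemma point3 (s : List (List Int)) (i j r c : Nat) (hi : i < s.length) :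
    (if (s.getD r []).getD c 0 = 1 then ((if r + 1 < s.length then [(r+1, c)] else []) : List (Nat × Nat)).count (i, j) else 0)
      = if r = i - 1 ∧ c = j then (if 0 < i ∧ j < (s.getD (i-1) []).length ∧ (s.getD (i-1) []).getD j 0 = 1 then 1 else 0) else 0 := by
  rw [count_if_singleton]
  by_cases hr : r = i - 1
  · subst hr
    by_cases hc : c = j
    · subst hc
      by_cases hR : (i-1) < s.length
      · by_cases hJ : c < (s.getD (i-1) []).length
        · split_ifs <;> omega
        · have hv : (s.getD (i-1) []).getD c 0 = 0 := List.getD_eq_default _ 0 (by omega)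
          rw [hv]
          split_ifs <;> omega
      · have hrow : s.getD (i-1) [] = ([] : List Int) := List.getD_eq_default _ _ (by omega)
        rw [hrow]
        simp only [List.getD_nil, List.length_nil]
        split_ifs <;> omega
    · split_ifs <;> omega
  · split_ifs <;> omega

lemma point4 (s : List (List Int)) (i j r c : Nat) :
    (if (s.getD r []).getD c 0 = 1 then ((if 1 ≤ c then [(r, c-1)] else []) : List (Nat × Nat)).count (i, j) else 0)
      = if r = i ∧ c = j + 1 then (if j + 1 < (s.getD i []).length ∧ (s.getD i []).getD (j+1) 0 = 1 then 1 else 0) else 0 := by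
  rw [count_if_singleton]
  by_cases hr : r = i
  · subst hr
    by_cases hc : c = j + 1
    · subst hc
      by_cases hR : r < s.length
      · by_cases hJ : (j+1) < (s.getD r []).length
        · split_ifs <;> omega
        · have hv : (s.getD r []).getD (j+1) 0 = 0 := List.getD_eq_default _ 0 (by omega)
          rw [hv]
          split_ifs <;> omega
      · have hrow : s.getD r [] = ([] : List Int) := List.getD_eq_default _ _ (by omega)
        rw [hrow]
        simp only [List.getD_nil, List.length_nil]
        split_ifs <;> omega
    · split_ifs <;> omega
  · split_ifs <;> omega

lemma point5 (s : List (List Int)) (i j r c : Nat) :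
    (if (s.getD r []).getD c 0 = 1 then ((if c + 1 < (s.getD r []).length then [(r, c+1)] else []) : List (Nat × Nat)).count (i, j) else 0)
      = if r = i ∧ c = j - 1 then (if 0 < j ∧ j < (s.getD i []).length ∧ (s.getD i []).getD (j-1) 0 = 1 then 1 else 0) else 0 := by
  rw [count_if_singleton]
  by_cases hr : r = i
  · subst hr
    by_cases hc : c = j - 1
    · subst hc
      by_cases hR : r < s.length
      · by_cases hJ : (j-1) < (s.getD r []).length
        · split_ifs <;> omega
        · have hv : (s.getD r []).getD (j-1) 0 = 0 := List.getD_eq_default _ 0 (by omega)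
          rw [hv]
          split_ifs <;> omega
      · have hrow : s.getD r [] = ([] : List Int) := List.getD_eq_default _ _ (by omega)
        rw [hrow]
        simp only [List.getD_nil, List.length_nil]
        split_ifs <;> omega
    · split_ifs <;> omega
  · split_ifs <;> omega

lemma map_sum_add5 {α : Type} (l : List α) (f1 f2 f3 f4 f5 : α → Nat) :
    (l.map (fun x => f1 x + f2 x + f3 x + f4 x + f5 x)).sum
      = (l.map f1).sum + (l.map f2).sum + (l.map f3).sum + (l.map f4).sum + (l.map f5).sum := by
  induction l with
  | nil => rfl
  | cons h t ih => simp only [List.map_cons, List.sum_cons, ih]; omega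

lemma count_toggles (s : List (List Int)) (i j : Nat) (hi : i < s.length) :
    (toggles s).count (i, j) =
      (if j < (s.getD i []).length ∧ (s.getD i []).getD j 0 = 1 then 1 else 0)
      + (if 0 < i ∧ j < (s.getD (i-1) []).length ∧ (s.getD (i-1) []).getD j 0 = 1 then 1 else 0)
      + (if i+1 < s.length ∧ j < (s.getD (i+1) []).length ∧ (s.getD (i+1) []).getD j 0 = 1 then 1 else 0)
      + (if 0 < j ∧ j < (s.getD i []).length ∧ (s.getD i []).getD (j-1) 0 = 1 then 1 else 0)
      + (if j+1 < (s.getD i []).length ∧ (s.getD i []).getD (j+1) 0 = 1 then 1 else 0) := by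
  unfold toggles
  rw [count_flatMap']
  have h1 : ∀ r ∈ List.range s.length,
      ((List.range (s.getD r []).length).flatMap
        (fun c => if (s.getD r []).getD c 0 = 1 then affected s r c else [])).count (i, j)
      = ((List.range (s.getD r []).length).map (fun c =>
          (if r = i ∧ c = j then (if j < (s.getD i []).length ∧ (s.getD i []).getD j 0 = 1 then 1 else 0) else 0)
          + (if r = i + 1 ∧ c = j then (if i + 1 < s.length ∧ j < (s.getD (i+1) []).length ∧ (s.getD (i+1) []).getD j 0 = 1 then 1 else 0) else 0)
          + (if r = i - 1 ∧ c = j then (if 0 < i ∧ j < (s.getD (i-1) []).length ∧ (s.getD (i-1) []).getD j 0 = 1 then 1 else 0) else 0)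
          + (if r = i ∧ c = j + 1 then (if j + 1 < (s.getD i []).length ∧ (s.getD i []).getD (j+1) 0 = 1 then 1 else 0) else 0)
          + (if r = i ∧ c = j - 1 then (if 0 < j ∧ j < (s.getD i []).length ∧ (s.getD i []).getD (j-1) 0 = 1 then 1 else 0) else 0))).sum := by
    intro r _
    rw [count_flatMap']
    congr 1
    apply List.map_congr_left
    intro c _
    have hsplit : ((if (s.getD r []).getD c 0 = 1 then affected s r c else []) : List (Nat × Nat)).count (i, j)
        = (if (s.getD r []).getD c 0 = 1 then ([(r, c)] : List (Nat × Nat)).count (i, j) else 0)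
        + (if (s.getD r []).getD c 0 = 1 then ((if 1 ≤ r then [(r-1, c)] else []) : List (Nat × Nat)).count (i, j) else 0)
        + (if (s.getD r []).getD c 0 = 1 then ((if r + 1 < s.length then [(r+1, c)] else []) : List (Nat × Nat)).count (i, j) else 0)
        + (if (s.getD r []).getD c 0 = 1 then ((if 1 ≤ c then [(r, c-1)] else []) : List (Nat × Nat)).count (i, j) else 0)
        + (if (s.getD r []).getD c 0 = 1 then ((if c + 1 < (s.getD r []).length then [(r, c+1)] else []) : List (Nat × Nat)).count (i, j) else 0) := by
      split <;> simp [affected, List.count_append, List.count_cons, List.getD_eq_getElem?_getD] <;> ring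
    rw [hsplit, point1, point2, point3 s i j r c hi, point4, point5]
  rw [List.map_congr_left h1]
  have h2 : ∀ r ∈ List.range s.length,
      ((List.range (s.getD r []).length).map (fun c =>
          (if r = i ∧ c = j then (if j < (s.getD i []).length ∧ (s.getD i []).getD j 0 = 1 then 1 else 0) else 0)
          + (if r = i + 1 ∧ c = j then (if i + 1 < s.length ∧ j < (s.getD (i+1) []).length ∧ (s.getD (i+1) []).getD j 0 = 1 then 1 else 0) else 0)
          + (if r = i - 1 ∧ c = j then (if 0 < i ∧ j < (s.getD (i-1) []).length ∧ (s.getD (i-1) []).getD j 0 = 1 then 1 else 0) else 0)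
          + (if r = i ∧ c = j + 1 then (if j + 1 < (s.getD i []).length ∧ (s.getD i []).getD (j+1) 0 = 1 then 1 else 0) else 0)
          + (if r = i ∧ c = j - 1 then (if 0 < j ∧ j < (s.getD i []).length ∧ (s.getD i []).getD (j-1) 0 = 1 then 1 else 0) else 0))).sum
      = ((List.range (s.getD r []).length).map (fun c => if r = i ∧ c = j then (if j < (s.getD i []).length ∧ (s.getD i []).getD j 0 = 1 then 1 else 0) else 0)).sum
      + ((List.range (s.getD r []).length).map (fun c => if r = i + 1 ∧ c = j then (if i + 1 < s.length ∧ j < (s.getD (i+1) []).length ∧ (s.getD (i+1) []).getD j 0 = 1 then 1 else 0) else 0)).sum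
      + ((List.range (s.getD r []).length).map (fun c => if r = i - 1 ∧ c = j then (if 0 < i ∧ j < (s.getD (i-1) []).length ∧ (s.getD (i-1) []).getD j 0 = 1 then 1 else 0) else 0)).sum
      + ((List.range (s.getD r []).length).map (fun c => if r = i ∧ c = j + 1 then (if j + 1 < (s.getD i []).length ∧ (s.getD i []).getD (j+1) 0 = 1 then 1 else 0) else 0)).sum
      + ((List.range (s.getD r []).length).map (fun c => if r = i ∧ c = j - 1 then (if 0 < j ∧ j < (s.getD i []).length ∧ (s.getD i []).getD (j-1) 0 = 1 then 1 else 0) else 0)).sum := by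
    intro r _
    exact map_sum_add5 _ _ _ _ _ _
  rw [List.map_congr_left h2, map_sum_add5,
      dsum_delta s.length (fun r => (s.getD r []).length) i j,
      dsum_delta s.length (fun r => (s.getD r []).length) (i+1) j,
      dsum_delta s.length (fun r => (s.getD r []).length) (i-1) j,
      dsum_delta s.length (fun r => (s.getD r []).length) i (j+1),
      dsum_delta s.length (fun r => (s.getD r []).length) i (j-1)]
  have e1 : (if i < s.length ∧ j < (s.getD i []).length then (if j < (s.getD i []).length ∧ (s.getD i []).getD j 0 = 1 then 1 else 0) else 0)
      = (if j < (s.getD i []).length ∧ (s.getD i []).getD j 0 = 1 then 1 else 0) := by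
    split_ifs <;> omega
  have e2 : (if i + 1 < s.length ∧ j < (s.getD (i+1) []).length then (if i + 1 < s.length ∧ j < (s.getD (i+1) []).length ∧ (s.getD (i+1) []).getD j 0 = 1 then 1 else 0) else 0)
      = (if i + 1 < s.length ∧ j < (s.getD (i+1) []).length ∧ (s.getD (i+1) []).getD j 0 = 1 then 1 else 0) := by
    split_ifs <;> omega
  have e3 : (if i - 1 < s.length ∧ j < (s.getD (i-1) []).length then (if 0 < i ∧ j < (s.getD (i-1) []).length ∧ (s.getD (i-1) []).getD j 0 = 1 then 1 else 0) else 0)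
      = (if 0 < i ∧ j < (s.getD (i-1) []).length ∧ (s.getD (i-1) []).getD j 0 = 1 then 1 else 0) := by
    split_ifs <;> omega
  have e4 : (if i < s.length ∧ j + 1 < (s.getD i []).length then (if j + 1 < (s.getD i []).length ∧ (s.getD i []).getD (j+1) 0 = 1 then 1 else 0) else 0)
      = (if j + 1 < (s.getD i []).length ∧ (s.getD i []).getD (j+1) 0 = 1 then 1 else 0) := by
    split_ifs <;> omega
  have e5 : (if i < s.length ∧ j - 1 < (s.getD i []).length then (if 0 < j ∧ j < (s.getD i []).length ∧ (s.getD i []).getD (j-1) 0 = 1 then 1 else 0) else 0)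
      = (if 0 < j ∧ j < (s.getD i []).length ∧ (s.getD i []).getD (j-1) 0 = 1 then 1 else 0) := by
    split_ifs <;> omega
  rw [e1, e2, e3, e4, e5]
  ring

lemma a0_row (n m k : Nat) (h : k < n) :
    (((List.range n).map (fun _ => (List.range m).map (fun _ => (0:Int)))).getD k [])
      = (List.range m).map (fun _ => (0:Int)) := by
  rw [List.getD_eq_getElem?_getD, List.getElem?_map, List.getElem?_range h]
  rfl

lemma a0_entry (n m k l : Nat) :
    ((((List.range n).map (fun _ => (List.range m).map (fun _ => (0:Int)))).getD k []).getD l 0) = 0 := by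
  by_cases hk : k < n
  · rw [a0_row n m k hk]
    by_cases hl : l < m
    · rw [List.getD_eq_getElem?_getD, List.getElem?_map, List.getElem?_range hl]
      rfl
    · rw [List.getD_eq_default ((List.range m).map (fun _ => (0:Int))) 0 (by simp; omega)]
  · rw [List.getD_eq_default ((List.range n).map (fun _ => (List.range m).map (fun _ => (0:Int)))) [] (by simp; omega),
        List.getD_nil]

lemma mem_if_singleton {P : Prop} [Decidable P] {x p : Nat × Nat}
    (h : p ∈ (if P then [x] else [] : List (Nat × Nat))) : P ∧ p = x := by
  split at h
  · exact ⟨by assumption, List.mem_singleton.1 h⟩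
  · cases h

lemma toggles_bounds (s : List (List Int)) (hpre : Pre_finalMatrix s) :
    ∀ p ∈ toggles s, p.1 < s.length ∧ p.2 < (s.getD 0 []).length := by
  intro p hp
  simp only [toggles, List.mem_flatMap, List.mem_range] at hp
  obtain ⟨r, hr, c, hc, hp⟩ := hp
  have hmemr : s.getD r [] ∈ s := by
    rw [List.getD_eq_getElem?_getD, List.getElem?_eq_getElem hr]
    exact List.getElem_mem hr
  split at hp
  case isTrue hval =>
    obtain ⟨hc1, hc2⟩ := hpre.2 (s.getD r []) hmemr c hc hval
    simp only [affected, List.mem_append, List.mem_singleton] at hp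
    rcases hp with ((((h1 | h2) | h3) | h4) | h5)
    · subst h1
      exact ⟨hr, hc1⟩
    · obtain ⟨hg, h⟩ := mem_if_singleton h2; subst h
      exact ⟨(by omega : r - 1 < s.length), hc1⟩
    · obtain ⟨hg, h⟩ := mem_if_singleton h3; subst h
      exact ⟨hg, hc1⟩
    · obtain ⟨hg, h⟩ := mem_if_singleton h4; subst h
      exact ⟨hr, (by omega : c - 1 < (s.getD 0 []).length)⟩
    · obtain ⟨hg, h⟩ := mem_if_singleton h5; subst h
      exact ⟨hr, hc2 hg⟩
  case isFalse => cases hp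

lemma getD_map_range {α : Type} (f : Nat → α) (d : α) (n k : Nat) (h : k < n) :
    (((List.range n).map f).getD k d) = f k := by
  rw [List.getD_eq_getElem?_getD, List.getElem?_map, List.getElem?_range h]
  rfl

lemma getElem_eq_getD_list (l : List (List Int)) (n : Nat) (h : n < l.length) :
    l[n] = l.getD n [] := by
  rw [List.getD_eq_getElem?_getD, List.getElem?_eq_getElem h]
  rfl

lemma getElem_eq_getD_int (l : List Int) (n : Nat) (h : n < l.length) :
    l[n] = l.getD n 0 := by
  rw [List.getD_eq_getElem?_getD, List.getElem?_eq_getElem h]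
  rfl

-- ===== VERDICT (by name: the statement is the Claim_ definition above) =====
theorem finalMatrix_spec : Claim_equal_finalMatrix := by
  intro s _ hpre
  unfold Spec_finalMatrix
  simp only [finalMatrix_alt]
  rw [finalMatrix_eq_fold]
  have hT : ∀ p ∈ toggles s, p.1 < (((List.range s.length).map (fun _ => (List.range ((s.getD 0 []).length)).map (fun _ => (0:Int))))).length ∧
      p.2 < ((((List.range s.length).map (fun _ => (List.range ((s.getD 0 []).length)).map (fun _ => (0:Int))))).getD p.1 []).length := by
    intro p hpm
    obtain ⟨h1, h2⟩ := toggles_bounds s hpre p hpm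
    refine ⟨by simpa using h1, ?_⟩
    rw [getD_map_range _ _ _ _ (by simpa using h1)]
    simpa using h2
  have h01 : ∀ i j, ((((List.range s.length).map (fun _ => (List.range ((s.getD 0 []).length)).map (fun _ => (0:Int)))).getD i []).getD j 0) = 0 ∨
      ((((List.range s.length).map (fun _ => (List.range ((s.getD 0 []).length)).map (fun _ => (0:Int)))).getD i []).getD j 0) = 1 := by
    intro i j
    exact Or.inl (a0_entry _ _ _ _)
  apply List.ext_getElem
  · rw [fold_length]
    simp
  · intro n h1 h2
    have hn : n < s.length := by
      rw [fold_length] at h1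
      simpa using h1
    apply List.ext_getElem
    · rw [getElem_eq_getD_list _ _ h1, fold_row_length, getD_map_range _ _ _ _ hn]
      simp
    · intro m hm1 hm2
      have hm : m < (s.getD 0 []).length := by
        rw [getElem_eq_getD_list _ _ h1, fold_row_length, getD_map_range _ _ _ _ hn] at hm1
        simpa using hm1
      rw [getElem_eq_getD_int _ _ hm1, getElem_eq_getD_int _ _ hm2,
          getElem_eq_getD_list _ _ h1, getElem_eq_getD_list _ _ h2,
          getD_map_range _ _ _ _ (by simpa using hn), getD_map_range _ _ _ _ hm,
          fold_entry (toggles s) _ hT h01 n m, a0_entry, count_toggles s n m hn]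
      split_ifs <;> first | contradiction | omega
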